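-- pv_equiv track=rewrite | github.com/xpessoles/Informatique | Exercices/03_tableaux/TAB-023/TAB-023-cor.py | nb_sousleau
-- ===== SOURCE A (Python) =====
-- def nb_sousleau(T):
--     """Nombre de positions sous l'eau dans T
--     Préconditions : T tableau de nombres"""
--     n = len(T)
--     max_deb, max_fin = [0]*n, [0]*n
--     max_deb[0] = T[0]
--     max_fin[-1] = T[-1]
--     for i in range(1,n) :
--         # Inv : max_deb[:i] contient les max cumulés de T[:i]
--         # Inv : max_fin[n-1-i:] contient les max cumulés de T[n-1-i:]
--         max_deb[i] = max(max_deb[i-1],T[i])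
--         max_fin[n-1-i] = max(max_fin[n-i],T[n-1-i])
--     nb = 0
--     for i in range(1,n-1) :
--         if T[i] < max_deb[i-1] and T[i] < max_fin[i+1] :
--             nb = nb+1
--     return nb
-- ===== SOURCE B (Python) =====
-- def nb_sousleau(T):
--     """Nombre de positions sous l'eau dans T
--     Préconditions : T tableau de nombres"""
--     n = len(T)
--     left, right = 0, n - 1
--     leftmax, rightmax = T[0], T[-1]
--     nb = 0
--     while left < right:
--         if leftmax <= rightmax:
--             left += 1
--             if T[left] < leftmax:
--                 nb += 1
--             else:
--                 leftmax = T[left]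
--         else:
--             right -= 1
--             if T[right] < rightmax:
--                 nb += 1
--             else:
--                 rightmax = T[right]
--     return nb
-- ===== Notes on version B (the rewrite author's own statement) =====
-- stated objective: simpler
-- what changed: Replaces A's two prefix/suffix maxima arrays and their two loops by a single two-pointer scan that advances the side with the smaller running maximum, keeping only two scalar maxima (O(1) extra space).
import Mathlib
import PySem

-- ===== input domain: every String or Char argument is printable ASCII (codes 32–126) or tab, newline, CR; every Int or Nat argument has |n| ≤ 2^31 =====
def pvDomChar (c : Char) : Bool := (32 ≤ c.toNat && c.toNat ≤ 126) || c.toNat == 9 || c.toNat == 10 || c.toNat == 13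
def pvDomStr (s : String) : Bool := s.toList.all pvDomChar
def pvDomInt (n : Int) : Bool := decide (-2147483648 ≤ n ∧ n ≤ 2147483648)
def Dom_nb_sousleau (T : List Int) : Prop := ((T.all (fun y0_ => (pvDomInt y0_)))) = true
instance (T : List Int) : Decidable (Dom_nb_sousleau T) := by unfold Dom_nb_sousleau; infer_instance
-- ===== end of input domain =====

-- B replaces A's two prefix/suffix maxima arrays (and their two loops) by a single
-- two-pointer scan keeping two scalar running maxima (objective: simpler, O(1) extra space).

-- ===== PORT A =====
-- for i in range(1,n): fill max_deb / max_fin (all accesses are in range; getD is the in-range access)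
def aLoop1 (T : List Int) (n : Nat) (md mf : List Int) (i : Nat) : List Int × List Int :=
  if i < n then
    aLoop1 T n (md.set i (max (md.getD (i-1) 0) (T.getD i 0)))
               (mf.set (n-1-i) (max (mf.getD (n-i) 0) (T.getD (n-1-i) 0))) (i+1)
  else (md, mf)
termination_by n - i

-- for i in range(1,n-1): count T[i] < max_deb[i-1] and T[i] < max_fin[i+1]
def aLoop2 (T md mf : List Int) (nm1 : Nat) (i : Nat) (nb : Int) : Int :=
  if i < nm1 then
    aLoop2 T md mf nm1 (i+1)
      (if T.getD i 0 < md.getD (i-1) 0 ∧ T.getD i 0 < mf.getD (i+1) 0 then nb+1 else nb)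
  else nb
termination_by nm1 - i

-- the first/last element accesses raise IndexError on empty T (excluded by Pre_); pyGetD is the exact in-range access
def nb_sousleau (T : List Int) : Int :=
  let n := T.length
  let md0 := (List.replicate n (0:Int)).set 0 (PySem.List.pyGetD T 0 0)
  let mf0 := (List.replicate n (0:Int)).set (n-1) (PySem.List.pyGetD T (-1) 0)
  let p := aLoop1 T n md0 mf0 1
  aLoop2 T p.1 p.2 (n-1) 1 0

-- ===== PORT B =====
-- while left < right: advance the side whose running maximum is not larger
def bLoop (T : List Int) (left right : Nat) (lm rm nb : Int) : Int :=
  if left < right then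
    if lm ≤ rm then
      if T.getD (left+1) 0 < lm then bLoop T (left+1) right lm rm (nb+1)
      else bLoop T (left+1) right (T.getD (left+1) 0) rm nb
    else
      if T.getD (right-1) 0 < rm then bLoop T left (right-1) lm rm (nb+1)
      else bLoop T left (right-1) lm (T.getD (right-1) 0) nb
  else nb
termination_by right - left
decreasing_by all_goals omega

def nb_sousleau_alt (T : List Int) : Int :=
  let n := T.length
  bLoop T 0 (n-1) (PySem.List.pyGetD T 0 0) (PySem.List.pyGetD T (-1) 0) 0

-- ===== PRECONDITION & SPEC =====
-- Pre_ excludes only the empty list, on which A (and B alike) raise IndexError at the first element access.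
def Pre_nb_sousleau (T : List Int) : Prop := T ≠ []
instance (T : List Int) : Decidable (Pre_nb_sousleau T) := by unfold Pre_nb_sousleau; infer_instance
def pvWitness_nb_sousleau : List Int := [2, 0, 3, 1, 2]

def Spec_nb_sousleau (T : List Int) (out : Int) : Prop := out = nb_sousleau_alt T
instance (T : List Int) (out : Int) : Decidable (Spec_nb_sousleau T out) := by unfold Spec_nb_sousleau; infer_instance

-- ===== CLAIM (what is proved, stated in full; the proofs are below) =====
def Claim_equal_nb_sousleau : Prop := ∀ (T : List Int), Dom_nb_sousleau T → Pre_nb_sousleau T → Spec_nb_sousleau T (nb_sousleau T)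

-- ===== LEMMAS AND PROOFS =====

-- max of T[0..i] (inclusive), seeded with T[0]
def pmax (T : List Int) (i : Nat) : Int := (T.take (i+1)).foldl max (T.getD 0 0)
-- max of T[j..], seeded with T[n-1]
def smax (T : List Int) (j : Nat) : Int := (T.drop j).foldl max (T.getD (T.length - 1) 0)

-- the reference count: underwater indices i ∈ [a,b]
def uInd (T : List Int) (i : Nat) : Bool :=
  decide (T.getD i 0 < pmax T (i-1) ∧ T.getD i 0 < smax T (i+1))
def ucnt (T : List Int) (a b : Nat) : Int :=
  (((List.range' a (b+1-a)).filter (fun i => uInd T i)).length : Int)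

theorem getD_set_self (l : List Int) (i : Nat) (v : Int) (h : i < l.length) :
    (l.set i v).getD i 0 = v := by
  simp only [List.getD, List.length_set, h, getElem?_pos, List.getElem_set_self, Option.getD_some]

theorem getD_set_ne (l : List Int) (i j : Nat) (v : Int) (h : j ≠ i) :
    (l.set i v).getD j 0 = l.getD j 0 := by
  simp only [List.getD, List.getElem?_set]
  rw [if_neg (fun hh => h hh.symm)]

theorem foldl_max_shuffle (l : List Int) : ∀ a x : Int, l.foldl max (max a x) = max x (l.foldl max a) := by
  induction l with
  | nil => intro a x; simp [max_comm]
  | cons y l ih =>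
    intro a x
    simp only [List.foldl]
    rw [show max (max a x) y = max (max a y) x by rw [max_assoc, max_assoc, max_comm x y], ih]

theorem foldl_max_init_mono (l : List Int) : ∀ a b : Int, a ≤ b → l.foldl max a ≤ l.foldl max b := by
  induction l with
  | nil => intro a b h; simpa
  | cons y l ih => intro a b h; exact ih _ _ (max_le_max_right y h)

theorem le_foldl_max' (l : List Int) (a : Int) : a ≤ l.foldl max a := by
  induction l generalizing a with
  | nil => simp
  | cons y l ih => exact le_trans (le_max_left a y) (ih _)

theorem foldl_max_take_le (l : List Int) (k : Nat) (a : Int) :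
    (l.take k).foldl max a ≤ l.foldl max a := by
  conv_rhs => rw [← List.take_append_drop k l]
  rw [List.foldl_append]
  exact le_foldl_max' _ _

theorem pmax_zero (T : List Int) (h : T ≠ []) : pmax T 0 = T.getD 0 0 := by
  cases T with
  | nil => exact absurd rfl h
  | cons x t => simp [pmax]

theorem pmax_succ (T : List Int) (i : Nat) (h : i + 1 < T.length) :
    pmax T (i+1) = max (pmax T i) (T.getD (i+1) 0) := by
  unfold pmax
  rw [List.take_add_one, List.getElem?_eq_getElem h, List.foldl_append,
      List.getD_eq_getElem T 0 h]
  simp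

theorem pmax_mono (T : List Int) {i j : Nat} (h : i ≤ j) : pmax T i ≤ pmax T j := by
  unfold pmax
  have he : T.take (i+1) = (T.take (j+1)).take (i+1) := by
    rw [List.take_take, min_eq_left (by omega)]
  rw [he]
  exact foldl_max_take_le _ _ _

theorem smax_last (T : List Int) (h : T ≠ []) : smax T (T.length - 1) = T.getD (T.length - 1) 0 := by
  have hlt : T.length - 1 < T.length := by
    have := List.length_pos_iff.mpr h; omega
  unfold smax
  rw [List.drop_eq_getElem_cons hlt, show T.length - 1 + 1 = T.length by omega,
      List.drop_length, List.getD_eq_getElem T 0 hlt]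
  simp

theorem smax_cons (T : List Int) (j : Nat) (h : j < T.length) :
    smax T j = max (T.getD j 0) (smax T (j+1)) := by
  unfold smax
  rw [List.drop_eq_getElem_cons h]
  simp only [List.foldl]
  rw [← List.getD_eq_getElem T 0 h, foldl_max_shuffle]

theorem smax_anti (T : List Int) {j k : Nat} (h : j ≤ k) : smax T k ≤ smax T j := by
  unfold smax
  have hd : T.drop k = List.drop (k - j) (T.drop j) := by
    rw [List.drop_drop, Nat.add_sub_cancel' h]
  rw [hd]
  conv_rhs => rw [← List.take_append_drop (k-j) (T.drop j)]
  rw [List.foldl_append]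
  exact foldl_max_init_mono _ _ _ (le_foldl_max' _ _)

theorem ucnt_nil (T : List Int) (a b : Nat) (h : b + 1 ≤ a) : ucnt T a b = 0 := by
  unfold ucnt
  rw [show b + 1 - a = 0 by omega]
  simp

theorem ucnt_cons (T : List Int) (a b : Nat) (h : a ≤ b) :
    ucnt T a b = (if uInd T a then 1 else 0) + ucnt T (a+1) b := by
  unfold ucnt
  rw [show b + 1 - a = (b + 1 - (a+1)) + 1 by omega, List.range'_succ]
  by_cases hc : uInd T a
  · simp only [List.filter_cons, hc, if_pos, List.length_cons]
    push_cast
    ring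
  · simp [hc]

theorem ucnt_concat (T : List Int) (a b : Nat) (h : a ≤ b) (hb : 1 ≤ b) :
    ucnt T a b = ucnt T a (b-1) + (if uInd T b then 1 else 0) := by
  unfold ucnt
  rw [show b + 1 - a = ((b-1) + 1 - a) + 1 by omega, List.range'_concat,
      show a + 1 * ((b-1) + 1 - a) = b by omega]
  by_cases hc : uInd T b
  · simp [List.filter_append, hc]
  · simp [List.filter_append, hc]

-- ===== A-side =====
theorem aLoop1_post (T : List Int) (n : Nat) (hn : n = T.length) :
    ∀ g i md mf, n - i = g → 1 ≤ i → i ≤ n →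
      md.length = n → mf.length = n →
      (∀ j, j < i → md.getD j 0 = pmax T j) →
      (∀ j, n - i ≤ j → j < n → mf.getD j 0 = smax T j) →
      (∀ j, j < n → (aLoop1 T n md mf i).1.getD j 0 = pmax T j) ∧
      (∀ j, j < n → (aLoop1 T n md mf i).2.getD j 0 = smax T j) := by
  intro g
  induction g with
  | zero =>
    intro i md mf hg h1 hi hmdl hmfl Hmd Hmf
    have hni : ¬ i < n := by omega
    unfold aLoop1
    rw [if_neg hni]
    exact ⟨fun j hj => Hmd j (by omega), fun j hj => Hmf j (by omega) hj⟩
  | succ g ih =>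
    intro i md mf hg h1 hi hmdl hmfl Hmd Hmf
    have hlt : i < n := by omega
    unfold aLoop1
    rw [if_pos hlt]
    apply ih (i+1) _ _ (by omega) (by omega) (by omega) (by simpa) (by simpa)
    · -- new md invariant
      intro j hj
      by_cases hji : j = i
      · subst hji
        rw [getD_set_self _ _ _ (by omega)]
        rw [Hmd (j-1) (by omega)]
        have := pmax_succ T (j-1) (by omega)
        rw [show j - 1 + 1 = j by omega] at this
        exact this.symm
      · rw [getD_set_ne _ _ _ _ hji]
        exact Hmd j (by omega)
    · -- new mf invariant
      intro j hj1 hj2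
      by_cases hji : j = n-1-i
      · subst hji
        rw [getD_set_self _ _ _ (by omega)]
        rw [Hmf (n-i) (by omega) (by omega)]
        have := smax_cons T (n-1-i) (by omega)
        rw [show n - 1 - i + 1 = n - i by omega] at this
        rw [this, max_comm]
      · rw [getD_set_ne _ _ _ _ hji]
        exact Hmf j (by omega) hj2

theorem aLoop2_spec (T md mf : List Int) (n : Nat) (hn : n = T.length)
    (hmd : ∀ j, j < n → md.getD j 0 = pmax T j)
    (hmf : ∀ j, j < n → mf.getD j 0 = smax T j) :
    ∀ g i nb, (n-1) - i = g → 1 ≤ i →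
      aLoop2 T md mf (n-1) i nb = nb + ucnt T i (n-2) := by
  intro g
  induction g with
  | zero =>
    intro i nb hg h1
    have hni : ¬ i < n-1 := by omega
    unfold aLoop2
    rw [if_neg hni, ucnt_nil T i (n-2) (by omega)]
    ring
  | succ g ih =>
    intro i nb hg h1
    have hlt : i < n-1 := by omega
    unfold aLoop2
    rw [if_pos hlt]
    rw [ih (i+1) _ (by omega) (by omega)]
    rw [ucnt_cons T i (n-2) (by omega)]
    have hcond : (T.getD i 0 < md.getD (i-1) 0 ∧ T.getD i 0 < mf.getD (i+1) 0)
        ↔ uInd T i = true := by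
      rw [hmd (i-1) (by omega), hmf (i+1) (by omega)]
      simp [uInd]
    by_cases hc : uInd T i = true
    · rw [if_pos (hcond.mpr hc), if_pos hc]; ring
    · rw [if_neg (fun hh => hc (hcond.mp hh)), if_neg hc]; ring

theorem a_eq_ucnt (T : List Int) (h : T ≠ []) :
    nb_sousleau T = ucnt T 1 (T.length - 2) := by
  have hn1 : 1 ≤ T.length := List.length_pos_iff.mpr h
  unfold nb_sousleau
  simp only []
  have hpost := aLoop1_post T T.length rfl (T.length - 1) 1
    ((List.replicate T.length (0:Int)).set 0 (PySem.List.pyGetD T 0 0))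
    ((List.replicate T.length (0:Int)).set (T.length-1) (PySem.List.pyGetD T (-1) 0))
    (by omega) (by omega) (by omega) (by simp) (by simp)
    (by
      intro j hj
      have hj0 : j = 0 := by omega
      subst hj0
      rw [getD_set_self _ _ _ (by simpa), PySem.List.pyGetD_zero, pmax_zero T h])
    (by
      intro j hj1 hj2
      have hj0 : j = T.length - 1 := by omega
      subst hj0
      rw [getD_set_self _ _ _ (by simp; omega), PySem.List.pyGetD_neg_one T 0 h,
          smax_last T h, List.getD_eq_getElem T 0 (by omega), List.getLast_eq_getElem h])
  exact (aLoop2_spec T _ _ T.length rfl hpost.1 hpost.2 (T.length - 1 - 1) 1 0 rfl (by omega)).trans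
    (by ring)

-- ===== B-side =====
theorem bLoop_stop (T : List Int) (r : Nat) (lm rm nb : Int) : bLoop T r r lm rm nb = nb := by
  unfold bLoop
  simp

theorem bLoop_inv (T : List Int) (h : T ≠ []) :
    ∀ g l r lm rm nb, r - l = g → l ≤ r → r ≤ T.length - 1 →
      lm = pmax T l → rm = smax T r →
      (r < T.length - 1 → smax T (r+1) < lm) →
      (1 ≤ l → pmax T (l-1) ≤ rm) →
      bLoop T l r lm rm nb = nb + ucnt T (l+1) (r-1) := by
  have hn1 : 1 ≤ T.length := List.length_pos_iff.mpr h
  intro g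
  induction g with
  | zero =>
    intro l r lm rm nb hg hlr hr hlm hrm hclR hclL
    have hlr' : l = r := by omega
    subst hlr'
    rw [bLoop_stop, ucnt_nil T (l+1) (l-1) (by omega)]
    ring
  | succ g ih =>
    intro l r lm rm nb hg hlr hr hlm hrm hclR hclL
    have hlt : l < r := by omega
    have hrn : r < T.length := by omega
    unfold bLoop
    rw [if_pos hlt]
    by_cases hb : lm ≤ rm
    · rw [if_pos hb]
      by_cases hir : l + 1 = r
      · -- meeting from the left: the check is necessarily false
        have hnot : ¬ (T.getD (l+1) 0 < lm) := by
          rw [hir]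
          intro hcon
          by_cases hre : r = T.length - 1
          · have hrmv : rm = T.getD r 0 := by
              rw [hrm, hre, smax_last T h]
            rw [hrmv] at hb
            exact absurd hcon (not_lt.mpr hb)
          · have h5 := hclR (by omega)
            rw [hrm, smax_cons T r hrn] at hb
            exact absurd hb (not_le.mpr (max_lt hcon h5))
        rw [if_neg hnot, hir, bLoop_stop, ucnt_nil T r (r-1) (by omega)]
        ring
      · -- ordinary left step
        have hiltr : l + 1 < r := by omega
        have hin : l + 1 < T.length := by omega
        have hpm := pmax_succ T l hin
        have hsm : T.getD (l+1) 0 < lm → T.getD (l+1) 0 < smax T (l+1+1) := by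
          intro hc
          calc T.getD (l+1) 0 < lm := hc
            _ ≤ rm := hb
            _ = smax T r := hrm
            _ ≤ smax T (l+1+1) := smax_anti T (by omega)
        have hui : uInd T (l+1) = decide (T.getD (l+1) 0 < lm) := by
          unfold uInd
          refine decide_eq_decide.mpr ?_
          rw [show l + 1 - 1 = l by omega, ← hlm]
          exact ⟨fun hx => hx.1, fun hc => ⟨hc, hsm hc⟩⟩
        by_cases hc : T.getD (l+1) 0 < lm
        · rw [if_pos hc]
          rw [ih (l+1) r lm rm (nb+1) (by omega) (by omega) hr
            (by rw [hlm] at hc ⊢; rw [hpm, max_eq_left hc.le])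
            hrm hclR
            (fun _ => by rw [show l + 1 - 1 = l by omega, ← hlm]; exact hb)]
          rw [ucnt_cons T (l+1) (r-1) (by omega), hui, decide_eq_true hc, if_pos rfl]
          ring
        · rw [if_neg hc]
          rw [ih (l+1) r (T.getD (l+1) 0) rm nb (by omega) (by omega) hr
            (by rw [hpm, ← hlm, max_eq_right (not_lt.mp hc)])
            hrm
            (fun hx => lt_of_lt_of_le (hclR hx) (not_lt.mp hc))
            (fun _ => by rw [show l + 1 - 1 = l by omega, ← hlm]; exact hb)]
          rw [ucnt_cons T (l+1) (r-1) (by omega), hui, decide_eq_false hc, if_neg (by simp)]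
          ring
    · -- right step
      rw [if_neg hb]
      have hb' : rm < lm := not_le.mp hb
      by_cases hjl : r - 1 = l
      · -- meeting from the right: the check is necessarily false
        have hnot : ¬ (T.getD (r-1) 0 < rm) := by
          rw [hjl]
          intro hcon
          by_cases hl0 : l = 0
          · rw [hlm, hl0, pmax_zero T h] at hb'
            rw [hl0] at hcon
            exact absurd hcon (lt_asymm hb')
          · have h6 := hclL (by omega)
            have hlrec := pmax_succ T (l-1) (by omega)
            rw [show l - 1 + 1 = l by omega] at hlrec
            rw [hlm, hlrec] at hb'
            exact absurd hb' (not_lt.mpr (max_le h6 hcon.le))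
        rw [if_neg hnot, hjl, bLoop_stop, ucnt_nil T (l+1) l (by omega)]
        ring
      · -- ordinary right step
        have hjgl : l < r - 1 := by omega
        have hjn : r - 1 < T.length := by omega
        have hsrec := smax_cons T (r-1) hjn
        rw [show r - 1 + 1 = r by omega, ← hrm] at hsrec
        have hui : uInd T (r-1) = decide (T.getD (r-1) 0 < rm) := by
          unfold uInd
          refine decide_eq_decide.mpr ?_
          rw [show r - 1 + 1 = r by omega, ← hrm]
          constructor
          · exact fun hx => hx.2
          · intro hc
            refine ⟨?_, hc⟩
            calc T.getD (r-1) 0 < rm := hc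
              _ < lm := hb'
              _ = pmax T l := hlm
              _ ≤ pmax T (r-1-1) := pmax_mono T (by omega)
        by_cases hc : T.getD (r-1) 0 < rm
        · rw [if_pos hc]
          rw [ih l (r-1) lm rm (nb+1) (by omega) (by omega) (by omega)
            hlm
            (by rw [hsrec, max_eq_right hc.le])
            (fun _ => by rw [show r - 1 + 1 = r by omega, ← hrm]; exact hb')
            hclL]
          rw [ucnt_concat T (l+1) (r-1) (by omega) (by omega), hui, decide_eq_true hc, if_pos rfl]
          rw [show r - 1 - 1 = r - 2 by omega]
          ring
        · rw [if_neg hc]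
          rw [ih l (r-1) lm (T.getD (r-1) 0) nb (by omega) (by omega) (by omega)
            hlm
            (by rw [hsrec, max_eq_left (not_lt.mp hc)])
            (fun _ => by rw [show r - 1 + 1 = r by omega, ← hrm]; exact hb')
            (fun hx => le_trans (hclL hx) (not_lt.mp hc))]
          rw [ucnt_concat T (l+1) (r-1) (by omega) (by omega), hui, decide_eq_false hc, if_neg (by simp)]
          rw [show r - 1 - 1 = r - 2 by omega]
          ring

theorem b_eq_ucnt (T : List Int) (h : T ≠ []) :
    nb_sousleau_alt T = ucnt T 1 (T.length - 2) := by
  have hn1 : 1 ≤ T.length := List.length_pos_iff.mpr h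
  unfold nb_sousleau_alt
  simp only []
  rw [bLoop_inv T h (T.length - 1) 0 (T.length - 1)
    (PySem.List.pyGetD T 0 0) (PySem.List.pyGetD T (-1) 0) 0
    (by omega) (by omega) (by omega)
    (by rw [PySem.List.pyGetD_zero, pmax_zero T h])
    (by rw [PySem.List.pyGetD_neg_one T 0 h, smax_last T h,
            List.getD_eq_getElem T 0 (by omega), List.getLast_eq_getElem h])
    (by omega) (by omega)]
  rw [show T.length - 1 - 1 = T.length - 2 by omega]
  ring

-- ===== VERDICT (by name: the statement is the Claim_ definition above) =====
theorem nb_sousleau_spec : Claim_equal_nb_sousleau := by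
  intro T _ hpre
  unfold Spec_nb_sousleau
  rw [a_eq_ucnt T hpre, b_eq_ucnt T hpre]
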